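-- pv_equiv track=rewrite | github.com/Narcissus0324/PDF-Acknowledger | src/chunk_by_acknowledgements_xata.py | extract_acknowledgements
-- ===== SOURCE A (Python) =====
-- def extract_acknowledgements(text_list):
--     '''提取致谢部分'''
--     ack_start = None
--     ack_end = None
--     for i, text in enumerate(text_list):
--         if 'acknowledgements' in text.lower():
--             ack_start = i
--         if ack_start is not None and 'references' in text.lower():
--             ack_end = i
--             break
--     if ack_start is not None:
--         if ack_end is None:
--             return text_list[ack_start:]
--         else:
--             return text_list[ack_start:ack_end]
--     return []
-- ===== SOURCE B (Python) =====
-- def extract_acknowledgements(text_list):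
--     '''Lines from the last acknowledgements heading up to the references heading.'''
--     lows = [t.lower() for t in text_list]
--     first = next((i for i, t in enumerate(lows) if 'acknowledgements' in t), None)
--     if first is None:
--         return []
--     tail = lows[first:]
--     rel_end = next((k for k, t in enumerate(tail) if 'references' in t), None)
--     section = tail if rel_end is None else tail[:rel_end]
--     start = first
--     for k, t in enumerate(section):
--         if 'acknowledgements' in t:
--             start = first + k
--     return text_list[start:] if rel_end is None else text_list[start:first + rel_end]
-- ===== Notes on version B (the rewrite author's own statement) =====
-- stated objective: alternative
-- what changed: replaces A's single stateful scan with an early break by separate passes: find the first acknowledgements marker, then the first references marker at or after it, then the last acknowledgements marker in the section strictly before the references line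
-- intended difference: on lists where the first references line at or after the first acknowledgements marker itself contains 'acknowledgements' and lies strictly after that marker, A returns the empty list because its ack_start accumulator lands on the references line itself, while B returns the section from the last acknowledgements heading strictly before the references line, which is the intended extraction — e.g. on extract_acknowledgements(["acknowledgements", "acknowledgements references"]): A returns [], B returns ["acknowledgements"]
import Mathlib
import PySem

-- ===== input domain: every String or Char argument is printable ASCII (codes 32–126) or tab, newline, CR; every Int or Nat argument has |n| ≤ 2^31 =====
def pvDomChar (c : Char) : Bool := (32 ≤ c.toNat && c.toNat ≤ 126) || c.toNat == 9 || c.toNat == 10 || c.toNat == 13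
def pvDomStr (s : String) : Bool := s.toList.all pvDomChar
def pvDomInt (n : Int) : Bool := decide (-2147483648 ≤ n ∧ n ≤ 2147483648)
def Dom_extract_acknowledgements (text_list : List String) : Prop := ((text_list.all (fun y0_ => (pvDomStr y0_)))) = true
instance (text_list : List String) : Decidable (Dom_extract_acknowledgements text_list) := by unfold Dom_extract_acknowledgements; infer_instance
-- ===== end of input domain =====

-- B replaces A's single stateful scan (with break) by separate passes: first acknowledgements
-- marker, first references marker at or after it, then the last acknowledgements marker in the
-- section strictly before the references line.  On the exceptional inputs where the references
-- line itself also contains 'acknowledgements' (and lies strictly after the first marker) the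
-- two values differ; that region is D_ below.

-- ===== PORT A =====
def pvHasAck (t : String) : Bool := PySem.Str.isIn "acknowledgements" (PySem.Str.lower t)
def pvHasRef (t : String) : Bool := PySem.Str.isIn "references" (PySem.Str.lower t)

def pvLoopA : Nat → Option Nat → List String → Option Nat × Option Nat
  | _, a, [] => (a, none)
  | i, a, t :: rest =>
    let a' := if pvHasAck t then some i else a
    if a'.isSome && pvHasRef t then (a', some i)
    else pvLoopA (i+1) a' rest

def extract_acknowledgements (text_list : List String) : List String :=
  match pvLoopA 0 none text_list with
  | (none, _) => []
  | (some s, none) => PySem.List.slice text_list (some (s : Int)) none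
  | (some s, some e) => PySem.List.slice text_list (some (s : Int)) (some (e : Int))

-- ===== PORT B =====
def extract_acknowledgements_alt (text_list : List String) : List String :=
  let lows := text_list.map PySem.Str.lower
  match lows.findIdx? (fun t => PySem.Str.isIn "acknowledgements" t) with
  | none => []
  | some first =>
    let tail := PySem.List.slice lows (some (first : Int)) none
    let relEnd := tail.findIdx? (fun t => PySem.Str.isIn "references" t)
    let sec := match relEnd with
      | none => tail
      | some k => PySem.List.slice tail none (some (k : Int))
    let start : Nat := sec.zipIdx.foldl
      (fun st p => if PySem.Str.isIn "acknowledgements" p.1 then first + p.2 else st) first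
    match relEnd with
    | none => PySem.List.slice text_list (some (start : Int)) none
    | some k => PySem.List.slice text_list (some (start : Int)) (some ((first : Int) + (k : Int)))

-- ===== PRECONDITION & SPEC =====
-- On inputs where the first references line at or after the first acknowledgements marker
-- itself contains 'acknowledgements' (strictly after that first marker), A returns the empty list (its
-- ack_start lands on the references line), while B returns the section from the last
-- acknowledgements heading before the references line — the intended extraction.
def D_extract_acknowledgements (text_list : List String) : Prop :=
  (match text_list.findIdx? pvHasAck with
   | none => false
   | some f =>
     match (text_list.drop f).findIdx? pvHasRef with
     | none => false
     | some k => decide (0 < k) && pvHasAck ((text_list.drop f).getD k "")) = true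
instance (text_list : List String) : Decidable (D_extract_acknowledgements text_list) := by
  unfold D_extract_acknowledgements; infer_instance

def Spec_extract_acknowledgements (text_list : List String) (out : List String) : Prop :=
  ¬ D_extract_acknowledgements text_list → out = extract_acknowledgements_alt text_list
instance (text_list : List String) (out : List String) : Decidable (Spec_extract_acknowledgements text_list out) := by unfold Spec_extract_acknowledgements; infer_instance

def pvDiffWitness_extract_acknowledgements : List String :=
  ["acknowledgements", "acknowledgements references"]
def pvDiffWitnessOut_extract_acknowledgements : (List String) × (List String) :=
  ([], ["acknowledgements"])

-- ===== CLAIM (what is proved, stated in full; the proofs are below) =====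
def Claim_unchanged_extract_acknowledgements : Prop := ∀ (text_list : List String), Dom_extract_acknowledgements text_list → Spec_extract_acknowledgements text_list (extract_acknowledgements text_list)
def Claim_changed_extract_acknowledgements : Prop := Dom_extract_acknowledgements (pvDiffWitness_extract_acknowledgements) ∧ D_extract_acknowledgements (pvDiffWitness_extract_acknowledgements) ∧ extract_acknowledgements (pvDiffWitness_extract_acknowledgements) = pvDiffWitnessOut_extract_acknowledgements.1 ∧ extract_acknowledgements_alt (pvDiffWitness_extract_acknowledgements) = pvDiffWitnessOut_extract_acknowledgements.2 ∧ pvDiffWitnessOut_extract_acknowledgements.1 ≠ pvDiffWitnessOut_extract_acknowledgements.2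
def Claim_exact_extract_acknowledgements : Prop := ∀ (text_list : List String), Dom_extract_acknowledgements text_list → D_extract_acknowledgements text_list → extract_acknowledgements text_list ≠ extract_acknowledgements_alt text_list

-- ===== LEMMAS AND PROOFS =====

-- last index (offset by i) of an ack-marked element, default s: A's ack_start accumulator
def pvLastAck (i s : Nat) : List String → Nat
  | [] => s
  | t :: rest => pvLastAck (i+1) (if pvHasAck t then i else s) rest

lemma pvLastAck_append (xs : List String) (t : String) :
    ∀ i s, pvLastAck i s (xs ++ [t]) = if pvHasAck t then i + xs.length else pvLastAck i s xs := by
  induction xs with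
  | nil => intro i s; simp [pvLastAck]
  | cons x xs ih =>
      intro i s
      simp only [List.cons_append, pvLastAck, ih, List.length_cons]
      split <;> omega

-- the accumulator stays at s or lands on a scanned index
lemma pvLastAck_bound (w : List String) : ∀ i s, pvLastAck i s w < i + w.length ∨ pvLastAck i s w = s := by
  induction w with
  | nil => intro i s; right; rfl
  | cons t rest ih =>
      intro i s
      simp only [pvLastAck, List.length_cons]
      rcases ih (i+1) (if pvHasAck t then i else s) with h | h
      · left; omega
      · rw [h]; split
        · left; omega
        · right; rfl

-- B's fold over zipIdx computes the same accumulator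
lemma pvFold_eq_lastAck (w : List String) (f : Nat) :
    w.zipIdx.foldl (fun st p => if pvHasAck p.1 then f + p.2 else st) f = pvLastAck f f w := by
  induction w using List.reverseRecOn with
  | nil => simp [pvLastAck]
  | append_singleton xs t ih =>
      rw [List.zipIdx_append, List.foldl_append, pvLastAck_append]
      simp [ih]

-- mode-some characterisation of A's loop
lemma pvLoopA_some (l : List String) : ∀ i s, pvLoopA i (some s) l =
    match l.findIdx? pvHasRef with
    | none => (some (pvLastAck i s l), none)
    | some k => (some (pvLastAck i s (l.take (k+1))), some (i + k)) := by
  induction l with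
  | nil => intro i s; simp [pvLoopA, pvLastAck]
  | cons t rest ih =>
      intro i s
      have ha' : (if pvHasAck t then some i else (some s : Option Nat))
          = some (if pvHasAck t then i else s) := by split <;> rfl
      by_cases hr : pvHasRef t
      · simp only [pvLoopA, List.findIdx?_cons, hr, List.take_succ_cons, List.take_zero,
          pvLastAck, Nat.add_zero, if_true, Bool.and_true, ha']
        split <;> simp_all
      · simp only [pvLoopA, List.findIdx?_cons, hr, Bool.and_false, Bool.false_eq_true,
          if_false, ha']
        rw [ih]
        cases hk : rest.findIdx? pvHasRef with
        | none => simp [pvLastAck]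
        | some k =>
            simp only [Option.map_some]
            simp [pvLastAck, List.take_succ_cons]
            omega

-- skipping the ack-free prefix
lemma pvLoopA_skip (l : List String) : ∀ (f : Nat), l.findIdx? pvHasAck = some f →
    ∀ i, pvLoopA i none l = pvLoopA (i + f) none (l.drop f) := by
  induction l with
  | nil => intro f h; simp [List.findIdx?_nil] at h
  | cons t rest ih =>
      intro f h i
      by_cases ha : pvHasAck t
      · rw [List.findIdx?_cons, if_pos ha] at h
        cases h; simp
      · rw [List.findIdx?_cons, if_neg ha] at h
        cases hf : rest.findIdx? pvHasAck with
        | none => rw [hf] at h; simp at h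
        | some f' =>
            rw [hf] at h
            simp only [Option.map_some, Option.some.injEq] at h
            subst h
            have : pvLoopA i none (t :: rest) = pvLoopA (i+1) none rest := by
              simp [pvLoopA, ha]
            rw [this, ih f' hf (i+1)]
            simp only [List.drop_succ_cons]
            congr 1
            omega

lemma pvLoopA_first_some (t : String) (rest : List String) (i : Nat) (ha : pvHasAck t = true) :
    pvLoopA i none (t :: rest) = pvLoopA i (some i) (t :: rest) := by
  simp [pvLoopA, ha]

lemma pvLoopA_no_ack (l : List String) (h : l.findIdx? pvHasAck = none) :
    ∀ i, pvLoopA i none l = (none, none) := by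
  induction l with
  | nil => intro i; rfl
  | cons t rest ih =>
      intro i
      rw [List.findIdx?_cons] at h
      by_cases ha : pvHasAck t
      · simp [ha] at h
      · rw [if_neg (by simp [ha])] at h
        cases hr : rest.findIdx? pvHasAck with
        | none => simp [pvLoopA, ha, ih hr]
        | some f => simp [hr] at h

-- B's fold, performed over the lowered copy, is A's ack_start accumulator
lemma pvFoldMap (w : List String) (f : Nat) :
    ((w.map PySem.Str.lower).zipIdx.foldl
      (fun st p => if PySem.Str.isIn "acknowledgements" p.1 then f + p.2 else st) f)
    = pvLastAck f f w := by
  rw [List.zipIdx_map, List.foldl_map, ← pvFold_eq_lastAck]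
  rfl

-- both ports, reduced to the same shape, with the one take(k+1)/take k discrepancy explicit
lemma pvA_eq (l : List String) (f : Nat) (hf : l.findIdx? pvHasAck = some f) :
    extract_acknowledgements l =
      match (l.drop f).findIdx? pvHasRef with
      | none => l.drop (pvLastAck f f (l.drop f))
      | some k => PySem.List.slice l (some ((pvLastAck f f ((l.drop f).take (k+1)) : Nat) : Int))
                    (some ((f + k : Nat) : Int)) := by
  obtain ⟨hflt, hackf, -⟩ := List.findIdx?_eq_some_iff_getElem.mp hf
  unfold extract_acknowledgements
  have hAside : pvLoopA 0 none l = pvLoopA f (some f) (l.drop f) := by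
    rw [pvLoopA_skip l f hf 0, Nat.zero_add, List.drop_eq_getElem_cons hflt,
      pvLoopA_first_some _ _ _ hackf, ← List.drop_eq_getElem_cons hflt]
  rw [hAside, pvLoopA_some]
  cases hk : (l.drop f).findIdx? pvHasRef with
  | none => simp [PySem.List.slice_from_natCast]
  | some k => simp

lemma pvB_eq (l : List String) (f : Nat) (hf : l.findIdx? pvHasAck = some f) :
    extract_acknowledgements_alt l =
      match (l.drop f).findIdx? pvHasRef with
      | none => l.drop (pvLastAck f f (l.drop f))
      | some k => PySem.List.slice l (some ((pvLastAck f f ((l.drop f).take k) : Nat) : Int))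
                    (some ((f + k : Nat) : Int)) := by
  unfold extract_acknowledgements_alt
  have hA : (l.map PySem.Str.lower).findIdx? (fun t => PySem.Str.isIn "acknowledgements" t)
      = l.findIdx? pvHasAck := List.findIdx?_map
  have hR : ∀ (xs : List String),
      (xs.map PySem.Str.lower).findIdx? (fun t => PySem.Str.isIn "references" t)
      = xs.findIdx? pvHasRef := fun xs => List.findIdx?_map
  simp only [hA, hf, PySem.List.slice_from_natCast, ← List.map_drop, hR]
  cases hk : (l.drop f).findIdx? pvHasRef with
  | none => simp only [pvFoldMap]
  | some k =>
      have h2 : ((f : Int) + (k : Int)) = ((f + k : Nat) : Int) := by push_cast; ring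
      simp only [PySem.List.slice_to_natCast, ← List.map_take, pvFoldMap, h2]

lemma pvTake_succ_lastAck (w : List String) (k f : Nat) (hk : k < w.length) :
    pvLastAck f f (w.take (k+1))
      = if pvHasAck w[k] then f + k else pvLastAck f f (w.take k) := by
  rw [List.take_add_one, List.getElem?_eq_getElem hk]
  simp only [Option.toList_some, pvLastAck_append, List.length_take]
  congr 2
  omega

lemma pvA_eq_none (l : List String) (f : Nat) (hf : l.findIdx? pvHasAck = some f)
    (hk : (l.drop f).findIdx? pvHasRef = none) :
    extract_acknowledgements l = l.drop (pvLastAck f f (l.drop f)) := by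
  rw [pvA_eq l f hf, hk]

lemma pvA_eq_some (l : List String) (f k : Nat) (hf : l.findIdx? pvHasAck = some f)
    (hk : (l.drop f).findIdx? pvHasRef = some k) :
    extract_acknowledgements l
      = PySem.List.slice l (some ((pvLastAck f f ((l.drop f).take (k+1)) : Nat) : Int))
          (some ((f + k : Nat) : Int)) := by
  rw [pvA_eq l f hf, hk]

lemma pvB_eq_none (l : List String) (f : Nat) (hf : l.findIdx? pvHasAck = some f)
    (hk : (l.drop f).findIdx? pvHasRef = none) :
    extract_acknowledgements_alt l = l.drop (pvLastAck f f (l.drop f)) := by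
  rw [pvB_eq l f hf, hk]

lemma pvB_eq_some (l : List String) (f k : Nat) (hf : l.findIdx? pvHasAck = some f)
    (hk : (l.drop f).findIdx? pvHasRef = some k) :
    extract_acknowledgements_alt l
      = PySem.List.slice l (some ((pvLastAck f f ((l.drop f).take k) : Nat) : Int))
          (some ((f + k : Nat) : Int)) := by
  rw [pvB_eq l f hf, hk]

-- ===== VERDICT (by name: the statement is the Claim_ definition above) =====
theorem extract_acknowledgements_spec : Claim_unchanged_extract_acknowledgements := by
  intro l _
  unfold Spec_extract_acknowledgements
  intro hD
  cases hf : l.findIdx? pvHasAck with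
  | none =>
      unfold extract_acknowledgements extract_acknowledgements_alt
      rw [pvLoopA_no_ack l hf 0]
      have hA : (l.map PySem.Str.lower).findIdx? (fun t => PySem.Str.isIn "acknowledgements" t)
          = l.findIdx? pvHasAck := List.findIdx?_map
      simp only [hA, hf]
  | some f =>
      cases hk : (l.drop f).findIdx? pvHasRef with
      | none => rw [pvA_eq_none l f hf hk, pvB_eq_none l f hf hk]
      | some k =>
          rw [pvA_eq_some l f k hf hk, pvB_eq_some l f k hf hk]
          unfold D_extract_acknowledgements at hD
          simp only [hf, hk] at hD
          have hklt : k < (l.drop f).length := (List.findIdx?_eq_some_iff_getElem.mp hk).1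
          rw [pvTake_succ_lastAck _ _ _ hklt]
          by_cases hack : pvHasAck (l.drop f)[k]
          all_goals rw [List.getElem_drop] at hack
          · have hk0 : k = 0 := by
              by_contra h
              exact hD (by simp [List.getD_eq_getElem?_getD, List.getElem?_eq_getElem hklt,
                List.getElem_drop, hack, Nat.pos_of_ne_zero h])
            subst hk0
            simp [List.getElem_drop, pvLastAck]
          · simp [List.getElem_drop, hack]

theorem extract_acknowledgements_changed : Claim_changed_extract_acknowledgements := by
  unfold Claim_changed_extract_acknowledgements; decide

theorem extract_acknowledgements_tight : Claim_exact_extract_acknowledgements := by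
  intro l _ hD
  unfold D_extract_acknowledgements at hD
  cases hf : l.findIdx? pvHasAck with
  | none => simp only [hf] at hD; exact absurd hD (by simp)
  | some f =>
      simp only [hf] at hD
      cases hk : (l.drop f).findIdx? pvHasRef with
      | none => simp only [hk] at hD; exact absurd hD (by simp)
      | some k =>
          simp only [hk, Bool.and_eq_true, decide_eq_true_eq] at hD
          obtain ⟨hkpos, hack⟩ := hD
          have hklt : k < (l.drop f).length := (List.findIdx?_eq_some_iff_getElem.mp hk).1
          rw [List.getD_eq_getElem?_getD, List.getElem?_eq_getElem hklt, Option.getD_some] at hack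
          rw [pvA_eq_some l f k hf hk, pvB_eq_some l f k hf hk,
            pvTake_succ_lastAck _ _ _ hklt, if_pos hack]
          have hfk : f + k < l.length := by
            have h := hklt
            rw [List.length_drop] at h
            omega
          have hs : pvLastAck f f ((l.drop f).take k) < f + k := by
            rcases pvLastAck_bound ((l.drop f).take k) f f with h | h
            · have h2 : ((l.drop f).take k).length ≤ k := List.length_take_le _ _
              omega
            · omega
          intro hEq
          have hAnil : PySem.List.slice l (some ((f + k : Nat) : Int))
              (some ((f + k : Nat) : Int)) = ([] : List String) := by
            rw [PySem.List.slice_natCast]; simp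
          rw [hAnil] at hEq
          have hlen : (PySem.List.slice l (some ((pvLastAck f f ((l.drop f).take k) : Nat) : Int))
              (some ((f + k : Nat) : Int))).length = 0 := by
            rw [← hEq]; rfl
          rw [PySem.List.length_slice] at hlen
          simp only [PySem.List.clampIdx_natCast] at hlen
          omega
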